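-- pv_equiv track=rewrite | github.com/krisstallenberg/srl-with-logistic-regression | feature_extraction/extract_position_rel2pred.py | extract_word_position_related_to_predicate
-- ===== SOURCE A (Python) =====
-- def extract_word_position_related_to_predicate(sentence):
--     """
--     Extract the token position related to predicate.
--
--     Return:
--         Before: if token is before predicate in sentence
--         After: if token is after predicate in sentence
--         _: if token is predicate itself
--
--     sentence (dict): The sentence object
--     """
--     # flag that shows word is before or after the predicate
--     is_before = True
--     features = []
--     for word in sentence:
--         # check if word is predicate itself append '_' to features list and reverse the is_before flag.
--         if word['predicate'] != '_':
--             features.append('_')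
--             is_before = False
--             continue
--         # for other words based in is_before flag value append 'Before' or 'After' to features list
--         features.append('Before' if is_before else 'After')
--
--     return features
-- ===== SOURCE B (Python) =====
-- def extract_word_position_related_to_predicate(sentence):
--     # Pivot-based re-implementation: find the first predicate's index up front,
--     # then map each token by position instead of flipping a flag mid-loop.
--     pivot = next((i for i, w in enumerate(sentence) if w['predicate'] != '_'),
--                  len(sentence))
--     return ['_' if w['predicate'] != '_' else ('Before' if i < pivot else 'After')
--             for i, w in enumerate(sentence)]
-- ===== Notes on version B (the rewrite author's own statement) =====
-- stated objective: alternative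
-- what changed: Replaces A's mutable is_before flag flipped inside a single accumulating loop with an up-front scan for the first predicate's index (pivot) plus a position-based comprehension mapping each token by comparing its index to the pivot.
import Mathlib
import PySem

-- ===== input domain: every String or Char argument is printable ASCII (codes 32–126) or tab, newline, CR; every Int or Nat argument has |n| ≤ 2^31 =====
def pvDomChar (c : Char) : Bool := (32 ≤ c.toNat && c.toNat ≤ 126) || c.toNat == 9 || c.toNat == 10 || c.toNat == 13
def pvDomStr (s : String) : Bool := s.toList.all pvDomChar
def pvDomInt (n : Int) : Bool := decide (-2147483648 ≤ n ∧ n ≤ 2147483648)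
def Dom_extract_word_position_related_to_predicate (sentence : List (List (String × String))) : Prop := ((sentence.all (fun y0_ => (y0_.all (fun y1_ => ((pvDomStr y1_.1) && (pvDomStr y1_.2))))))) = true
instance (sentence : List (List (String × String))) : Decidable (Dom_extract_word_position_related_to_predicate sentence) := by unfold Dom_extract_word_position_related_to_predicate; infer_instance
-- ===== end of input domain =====

-- B replaces A's mutable is_before flag (flipped mid-loop) with an up-front scan for the
-- first predicate's index (pivot) and a position-based mapping; objective: alternative.
-- Both Pythons raise KeyError when some word lacks the 'predicate' key; Pre_ excludes that.

-- ===== PORT A =====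
-- word['predicate'] is a first-match association-list lookup; a missing key is a KeyError,
-- excluded by Pre_ (the port defaults to "_" there, outside the claim).
def extract_word_position_related_to_predicate (sentence : List (List (String × String))) : List String :=
  (sentence.foldl
    (fun (st : Bool × List String) word =>
      if ((List.lookup "predicate" word).getD "_") ≠ "_" then
        (false, st.2 ++ ["_"])
      else
        (st.1, st.2 ++ [if st.1 then "Before" else "After"]))
    (true, [])).2

-- ===== PORT B =====
-- w['predicate'] ported as in A's port (missing key outside Pre_).
def pvPred (word : List (String × String)) : Bool :=
  ((List.lookup "predicate" word).getD "_") ≠ "_"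

-- pivot = index of the first predicate, len(sentence) if none (Python's next(..., len(sentence)))
def pvPivot (sentence : List (List (String × String))) : Nat :=
  sentence.findIdx pvPred

-- the list comprehension over enumerate(sentence)
def pvBuild (pivot : Nat) (i : Nat) : List (List (String × String)) → List String
  | [] => []
  | w :: ws =>
      (if pvPred w then "_" else if i < pivot then "Before" else "After") :: pvBuild pivot (i + 1) ws

def extract_word_position_related_to_predicate_alt (sentence : List (List (String × String))) : List String :=
  pvBuild (pvPivot sentence) 0 sentence

-- ===== PRECONDITION & SPEC =====
-- Pre_ excludes exactly the inputs where A raises KeyError: some word without a 'predicate' key.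
def Pre_extract_word_position_related_to_predicate (sentence : List (List (String × String))) : Prop :=
  ∀ w ∈ sentence, (List.lookup "predicate" w).isSome = true
instance (sentence : List (List (String × String))) : Decidable (Pre_extract_word_position_related_to_predicate sentence) := by unfold Pre_extract_word_position_related_to_predicate; infer_instance
def pvWitness_extract_word_position_related_to_predicate : (List (List (String × String))) :=
  [[("predicate", "_")], [("predicate", "eat")], [("predicate", "_")]]

def Spec_extract_word_position_related_to_predicate (sentence : List (List (String × String))) (out : List String) : Prop := out = extract_word_position_related_to_predicate_alt sentence
instance (sentence : List (List (String × String))) (out : List String) : Decidable (Spec_extract_word_position_related_to_predicate sentence out) := by unfold Spec_extract_word_position_related_to_predicate; infer_instance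

-- ===== CLAIM (what is proved, stated in full; the proofs are below) =====
def Claim_equal_extract_word_position_related_to_predicate : Prop := ∀ (sentence : List (List (String × String))), Dom_extract_word_position_related_to_predicate sentence → Pre_extract_word_position_related_to_predicate sentence → Spec_extract_word_position_related_to_predicate sentence (extract_word_position_related_to_predicate sentence)

-- ===== LEMMAS AND PROOFS =====

-- A's loop, written as structural recursion on the sentence (flag b = is_before)
def pvGoA (b : Bool) : List (List (String × String)) → List String
  | [] => []
  | w :: ws =>
      if pvPred w then "_" :: pvGoA false ws
      else (if b then "Before" else "After") :: pvGoA b ws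

theorem pvFoldl_goA (s : List (List (String × String))) (b : Bool) (acc : List String) :
    (s.foldl
      (fun (st : Bool × List String) word =>
        if ((List.lookup "predicate" word).getD "_") ≠ "_" then
          (false, st.2 ++ ["_"])
        else
          (st.1, st.2 ++ [if st.1 then "Before" else "After"]))
      (b, acc)).2 = acc ++ pvGoA b s := by
  induction s generalizing b acc with
  | nil => simp [pvGoA]
  | cons w ws ih =>
      by_cases h : pvPred w
      · simp only [List.foldl, pvGoA, pvPred] at *
        rw [if_pos (by simpa [pvPred] using h), if_pos (by simpa [pvPred] using h), ih]
        simp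
      · simp only [List.foldl, pvGoA]
        rw [if_neg (by simpa [pvPred] using h), if_neg h, ih]
        simp

theorem pvGoA_false (s : List (List (String × String))) (pivot i : Nat) (h : pivot ≤ i) :
    pvGoA false s = pvBuild pivot i s := by
  induction s generalizing i with
  | nil => rfl
  | cons w ws ih =>
      by_cases hw : pvPred w <;>
        simp [pvGoA, pvBuild, hw, Nat.not_lt.mpr h, ih (i + 1) (Nat.le_succ_of_le h)]

theorem pvGoA_true (s : List (List (String × String))) (i : Nat) :
    pvGoA true s = pvBuild (i + s.findIdx pvPred) i s := by
  induction s generalizing i with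
  | nil => rfl
  | cons w ws ih =>
      by_cases hw : pvPred w
      · simp [pvGoA, pvBuild, hw, List.findIdx_cons,
          pvGoA_false ws (i + 0) (i + 1) (by omega)]
      · have : i < i + (ws.findIdx pvPred + 1) := by omega
        simp [pvGoA, pvBuild, hw, List.findIdx_cons, this, ih (i + 1)]
        congr 1
        omega

-- ===== VERDICT (by name: the statement is the Claim_ definition above) =====
theorem extract_word_position_related_to_predicate_spec : Claim_equal_extract_word_position_related_to_predicate := by
  intro sentence _ _
  unfold Spec_extract_word_position_related_to_predicate
  unfold extract_word_position_related_to_predicate extract_word_position_related_to_predicate_alt pvPivot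
  rw [pvFoldl_goA, pvGoA_true sentence 0]
  simp
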